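-- pv_equiv track=rewrite | github.com/yanggf8/graphMER | src/training/kg_dataset_builder_v2.py | group_triples_by_head
-- ===== SOURCE A (Python) =====
-- from typing import List, Tuple, Dict
--
-- def group_triples_by_head(triples: List[Dict]) -> Dict[str, List[Dict]]:
--     """Group triples by head entity to create coherent training samples."""
--     grouped = {}
--     for triple in triples:
--         head = triple.get("head", "")
--         if not head:
--             continue
--         if head not in grouped:
--             grouped[head] = []
--         grouped[head].append(triple)
--     return grouped
-- ===== SOURCE B (Python) =====
-- def group_triples_by_head(triples):
--     """Group triples by head entity to create coherent training samples."""
--     seen = set()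
--     heads = []
--     for triple in triples:
--         head = triple.get("head", "")
--         if head and head not in seen:
--             seen.add(head)
--             heads.append(head)
--     return {head: [t for t in triples if t.get("head", "") == head]
--             for head in heads}
-- ===== Notes on version B (the rewrite author's own statement) =====
-- stated objective: alternative
-- what changed: Replaces the single-pass dict accumulation with a two-phase plan: one pass collects the distinct non-empty heads in first-appearance order, then a dict comprehension gathers each head's group by filtering the input per head.
import Mathlib
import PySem

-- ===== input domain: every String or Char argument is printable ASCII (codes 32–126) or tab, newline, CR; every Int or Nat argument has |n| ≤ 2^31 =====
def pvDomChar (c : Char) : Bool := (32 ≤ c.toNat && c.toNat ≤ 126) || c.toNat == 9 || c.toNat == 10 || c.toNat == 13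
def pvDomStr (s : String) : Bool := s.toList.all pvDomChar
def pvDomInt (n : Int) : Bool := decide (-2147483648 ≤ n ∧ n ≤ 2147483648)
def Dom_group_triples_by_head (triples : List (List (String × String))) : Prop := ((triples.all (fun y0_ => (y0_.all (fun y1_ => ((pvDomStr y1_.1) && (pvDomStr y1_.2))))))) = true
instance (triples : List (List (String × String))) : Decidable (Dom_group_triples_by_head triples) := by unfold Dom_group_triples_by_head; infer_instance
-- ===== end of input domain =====

-- B groups by first collecting the distinct non-empty heads, then filtering the input once per head
-- (alternative decomposition, same return value including key order).


-- ===== PORT A =====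
def group_triples_by_head (triples : List (List (String × String))) : List (String × List (List (String × String))) :=
  (triples.foldl
    (fun (grouped : PySem.Dict String (List (List (String × String)))) triple =>
      let head := PySem.Dict.getD (PySem.Dict.mk triple) "head" ""
      if head = "" then grouped
      else
        let grouped := if grouped.contains head then grouped else grouped.insert head []
        grouped.modify head [] (fun l => l ++ [triple]))
    PySem.Dict.empty).items

-- ===== PORT B =====
def group_triples_by_head_alt (triples : List (List (String × String))) : List (String × List (List (String × String))) :=
  let st := triples.foldl
    (fun (st : PySem.Set String × List String) triple =>
      let head := PySem.Dict.getD (PySem.Dict.mk triple) "head" ""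
      if head != "" && !(PySem.Set.contains st.1 head) then
        (PySem.Set.add st.1 head, st.2 ++ [head])
      else st)
    (PySem.Set.empty, [])
  st.2.map (fun head =>
    (head, triples.filter (fun t => PySem.Dict.getD (PySem.Dict.mk t) "head" "" == head)))

-- ===== PRECONDITION & SPEC =====
def Spec_group_triples_by_head (triples : List (List (String × String))) (out : List (String × List (List (String × String)))) : Prop := out = group_triples_by_head_alt triples
instance (triples : List (List (String × String))) (out : List (String × List (List (String × String)))) : Decidable (Spec_group_triples_by_head triples out) := by unfold Spec_group_triples_by_head; infer_instance

-- ===== CLAIM (what is proved, stated in full; the proofs are below) =====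
def Claim_equal_group_triples_by_head : Prop := ∀ (triples : List (List (String × String))), Dom_group_triples_by_head triples → Spec_group_triples_by_head triples (group_triples_by_head triples)

-- ===== LEMMAS AND PROOFS =====

/-- head of a triple, as both ports compute it -/
def pvHd (t : List (String × String)) : String := PySem.Dict.getD (PySem.Dict.mk t) "head" ""

/-- A's loop body -/
def pvStepA (grouped : PySem.Dict String (List (List (String × String)))) (triple : List (String × String)) : PySem.Dict String (List (List (String × String))) :=
  let head := pvHd triple
  if head = "" then grouped
  else
    let grouped := if grouped.contains head then grouped else grouped.insert head []
    grouped.modify head [] (fun l => l ++ [triple])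

def pvGA (ts : List (List (String × String))) : PySem.Dict String (List (List (String × String))) :=
  ts.foldl pvStepA PySem.Dict.empty

/-- the distinct non-empty heads in first-appearance order -/
def pvHF (ts : List (List (String × String))) : List String :=
  ts.foldl (fun hs t => if pvHd t != "" && !(PySem.Set.contains hs (pvHd t)) then hs ++ [pvHd t] else hs) []

lemma pvGA_snoc (ts : List (List (String × String))) (t : List (String × String)) :
    pvGA (ts ++ [t]) = pvStepA (pvGA ts) t := by
  simp [pvGA, List.foldl_append]

lemma pvHF_snoc (ts : List (List (String × String))) (t : List (String × String)) :
    pvHF (ts ++ [t]) = if pvHd t != "" && !(PySem.Set.contains (pvHF ts) (pvHd t)) then pvHF ts ++ [pvHd t] else pvHF ts := by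
  simp [pvHF, List.foldl_append]

lemma pvInv (ts : List (List (String × String))) :
    (pvGA ts).keys = pvHF ts ∧ (pvHF ts).Nodup ∧ (∀ h ∈ pvHF ts, h ≠ "") ∧
    (∀ h, h ≠ "" → (pvGA ts).getD h [] = ts.filter (fun t => pvHd t == h)) := by
  induction ts using List.reverseRecOn with
  | nil => simp [pvGA, pvHF, PySem.Dict.keys_empty, PySem.Dict.getD_empty]
  | append_singleton ts t ih =>
    obtain ⟨hk, hnd, hne, hg⟩ := ih
    rw [pvGA_snoc, pvHF_snoc]
    by_cases h0 : pvHd t = ""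
    · have hstep : pvStepA (pvGA ts) t = pvGA ts := by simp [pvStepA, h0]
      rw [hstep, if_neg (by simp [h0])]
      refine ⟨hk, hnd, hne, ?_⟩
      intro h hh
      rw [hg h hh, List.filter_append]
      have hne2 : (pvHd t == h) = false := by
        simp only [beq_eq_false_iff_ne, ne_eq, h0]; exact fun e => hh e.symm
      simp [hne2]
    · by_cases hc : pvHd t ∈ pvHF ts
      · have hcontains : (pvGA ts).contains (pvHd t) = true := by
          rw [PySem.Dict.contains_eq_decide_mem_keys, hk]; simpa using hc
        have hstep : pvStepA (pvGA ts) t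
            = (pvGA ts).insert (pvHd t) ((pvGA ts).getD (pvHd t) [] ++ [t]) := by
          simp [pvStepA, h0, hcontains, PySem.Dict.modify]
        rw [hstep, if_neg (by simp [hc])]
        refine ⟨by rw [PySem.Dict.keys_insert_of_contains _ _ hcontains, hk], hnd, hne, ?_⟩
        intro h hh
        rw [PySem.Dict.getD_insert, List.filter_append]
        by_cases heq : h = pvHd t
        · subst heq
          rw [if_pos rfl, hg _ h0]
          simp
        · rw [if_neg heq, hg h hh]
          have hne2 : (pvHd t == h) = false := by
            simp only [beq_eq_false_iff_ne, ne_eq]; exact fun e => heq e.symm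
          simp [hne2]
      · have hcontains : (pvGA ts).contains (pvHd t) = false := by
          rw [PySem.Dict.contains_eq_decide_mem_keys, hk]; simpa using hc
        have hempty : (pvGA ts).getD (pvHd t) [] = [] :=
          PySem.Dict.getD_of_not_contains _ _ hcontains
        have hstep : pvStepA (pvGA ts) t = (pvGA ts).insert (pvHd t) [t] := by
          simp [pvStepA, h0, hcontains, PySem.Dict.modify, PySem.Dict.insert_insert_self,
            PySem.Dict.getD_insert_self]
        rw [hstep, if_pos (by simp [h0, hc])]
        refine ⟨?_, ?_, ?_, ?_⟩
        · rw [PySem.Dict.keys_insert_of_not_contains _ _ hcontains, hk]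
        · exact List.Nodup.append hnd (List.nodup_singleton _)
            (by intro a ha hb; simp at hb; subst hb; exact hc ha)
        · intro h hh
          rcases List.mem_append.mp hh with h1 | h1
          · exact hne h h1
          · simp at h1; exact h1 ▸ h0
        · intro h hh
          rw [PySem.Dict.getD_insert, List.filter_append]
          by_cases heq : h = pvHd t
          · have hfz : ts.filter (fun t' => pvHd t' == h) = [] := by
              rw [← hg h hh, heq]; exact hempty
            rw [if_pos heq, hfz]
            subst heq; simp
          · rw [if_neg heq, hg h hh]
            have hne2 : (pvHd t == h) = false := by
              simp only [beq_eq_false_iff_ne, ne_eq]; exact fun e => heq e.symm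
            simp [hne2]

/-- B's pair fold carries (heads-as-set, heads-list), both equal to pvHF -/
lemma pvB_fold (ts : List (List (String × String))) :
    ts.foldl
      (fun (st : PySem.Set String × List String) triple =>
        let head := PySem.Dict.getD (PySem.Dict.mk triple) "head" ""
        if head != "" && !(PySem.Set.contains st.1 head) then
          (PySem.Set.add st.1 head, st.2 ++ [head])
        else st)
      (PySem.Set.empty, []) = (pvHF ts, pvHF ts) := by
  induction ts using List.reverseRecOn with
  | nil => simp [pvHF, PySem.Set.empty]
  | append_singleton ts t ih =>
    rw [List.foldl_append, ih, pvHF_snoc]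
    show (if pvHd t != "" && !(PySem.Set.contains (pvHF ts) (pvHd t)) then
          (PySem.Set.add (pvHF ts) (pvHd t), pvHF ts ++ [pvHd t]) else (pvHF ts, pvHF ts)) = _
    by_cases hb : (pvHd t != "" && !(PySem.Set.contains (pvHF ts) (pvHd t))) = true
    · rw [if_pos hb, if_pos hb]
      simp only [Bool.and_eq_true, Bool.not_eq_true'] at hb
      have : pvHd t ∉ pvHF ts := fun hm => by
        rw [(PySem.Set.contains_iff _ _).mpr hm] at hb
        exact absurd hb.2 (by simp)
      rw [PySem.Set.add_of_not_mem this]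
    · rw [if_neg hb, if_neg hb]

-- ===== VERDICT (by name: the statement is the Claim_ definition above) =====
theorem group_triples_by_head_spec : Claim_equal_group_triples_by_head := by
  intro ts _
  unfold Spec_group_triples_by_head group_triples_by_head_alt
  rw [pvB_fold]
  obtain ⟨hk, hnd, hne, hg⟩ := pvInv ts
  have hka : group_triples_by_head ts = (pvGA ts).items := rfl
  rw [hka, PySem.Dict.items_eq_map_keys _ (hk ▸ hnd) ([] : List (List (String × String))), hk]
  exact List.map_congr_left fun h hh => by rw [hg h (hne h hh)]; rfl
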